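-- pv_equiv track=rewrite | github.com/euske/introdl | transformer/transformer.py | transformer
-- ===== SOURCE A (Python) =====
-- def encoder(src):
--     # 入力列から2つの辞書を作成する。
--     h1 = { key1(x): value1(x) for x in src }
--     h2 = { key2(x): value2(x) for x in src }
--     memory = (h1,h2)
--     return memory
--
-- def decoder(memory, target):
--     # 2つの辞書を使って出力を生成する。
--     (h1,h2) = memory
--     v1 = [ h1.get(query1(x)) for x in target ]
--     v2 = [ h2.get(query2(x)) for x in target ]
--     return ff(v1,v2)
--
-- def transformer(input):
--     # 入力列を memory に変換する。
--     memory = encoder(input)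
--     # 出力列を初期化する。
--     output = [BOS]
--     while True:
--         # ひとつずつ要素を足していく。
--         elem = decoder(memory, output)
--         output.append(elem)
--         # EOS が来たら終了。
--         if elem == EOS: break
--     return output
--
-- BOS = 0
--
-- EOS = 999
--
-- def key1(x): return x
--
-- def value1(x): return x
--
-- def key2(x): return x
--
-- def value2(x): return 1
--
-- def query1(x): return x
--
-- def query2(x): return x+1
--
-- def ff(v1,v2):
--     x1 = v1[-1]
--     x2 = v2[-1]
--     if x2 is None:
--         return EOS
--     else:
--         return x1+1
-- ===== SOURCE B (Python) =====
-- def transformer(input):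
--     # Closed-form: A's loop just counts 0,1,2,... while the next value is
--     # present in the input, then appends EOS (= 999); it also stops at 999
--     # because of the EOS comparison.  Scan for the first missing successor
--     # and emit the whole output at once.
--     s = set(input)
--     k = 1
--     while k < 999 and k in s:
--         k += 1
--     return list(range(k)) + [999]
-- ===== Notes on version B (the rewrite author's own statement) =====
-- stated objective: faster
-- what changed: A builds two dicts over the input and rebuilds two full lookup lists over the growing output on every loop iteration just to read their last elements; B builds one set and scans once for the first k in 1..998 missing from it, returning list(range(k)) + [999] in closed form.
-- outside the precondition, e.g. on transformer([1]): A raises TypeError, B returns [0, 1, 999]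
import Mathlib
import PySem

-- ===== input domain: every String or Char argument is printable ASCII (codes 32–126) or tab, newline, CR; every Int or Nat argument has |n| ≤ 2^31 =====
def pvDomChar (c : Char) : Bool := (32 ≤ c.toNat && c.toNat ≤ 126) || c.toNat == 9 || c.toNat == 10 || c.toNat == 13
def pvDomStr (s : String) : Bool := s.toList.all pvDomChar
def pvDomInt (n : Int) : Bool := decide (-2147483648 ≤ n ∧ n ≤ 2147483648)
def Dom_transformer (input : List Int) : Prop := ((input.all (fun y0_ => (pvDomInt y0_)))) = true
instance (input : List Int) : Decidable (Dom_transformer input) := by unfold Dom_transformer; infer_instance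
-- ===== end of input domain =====

-- B replaces A's two dicts and per-iteration rebuild of full lookup lists by one
-- set and a single scan for the first missing successor, emitted as one range
-- (objective: faster; a timing run measured B faster on large inputs).

-- ===== PORT A =====
def key1A (x : Int) : Int := x
def value1A (x : Int) : Int := x
def key2A (x : Int) : Int := x
def value2A (_x : Int) : Int := 1
def query1A (x : Int) : Int := x
def query2A (x : Int) : Int := x + 1

def encoderA (src : List Int) : PySem.Dict Int Int × PySem.Dict Int Int :=
  (src.foldl (fun d x => d.insert (key1A x) (value1A x)) PySem.Dict.empty,
   src.foldl (fun d x => d.insert (key2A x) (value2A x)) PySem.Dict.empty)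

-- none = the Python raises (TypeError on None+1, or IndexError on empty target);
-- such inputs are excluded by Pre_transformer.
def ffA (v1 v2 : List (Option Int)) : Option Int :=
  match PySem.List.pyGet? v1 (-1), PySem.List.pyGet? v2 (-1) with
  | some x1, some x2 =>
      match x2 with
      | none => some 999
      | some _ => x1.map (fun a => a + 1)
  | _, _ => none

def decoderA (memory : PySem.Dict Int Int × PySem.Dict Int Int) (target : List Int) : Option Int :=
  let v1 := target.map (fun x => memory.1.get? (query1A x))
  let v2 := target.map (fun x => memory.2.get? (query2A x))
  ffA v1 v2

-- A's while-True loop; each appended elem strictly increases and the loop breaks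
-- at 999, so 1000 steps of fuel always suffice (proved via loopA_eq below).
def loopA (memory : PySem.Dict Int Int × PySem.Dict Int Int) (output : List Int) : Nat → List Int
  | 0 => output
  | fuel + 1 =>
    match decoderA memory output with
    | none => output
    | some elem =>
      let output' := output ++ [elem]
      if elem = 999 then output' else loopA memory output' fuel

def transformer (input : List Int) : List Int :=
  loopA (encoderA input) [0] 1000

-- ===== PORT B =====
def scanB (s : List Int) (k : Nat) : Nat :=
  if k < 999 ∧ (k : Int) ∈ s then scanB s (k + 1) else k
termination_by 999 - k

def transformer_alt (input : List Int) : List Int :=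
  let s := PySem.Set.ofList input
  let k := scanB s 1
  (List.range k).map (fun n => (n : Int)) ++ [999]

-- ===== PRECONDITION & SPEC =====
-- Pre_ excludes exactly the inputs that contain 1 but not 0, on which A raises
-- TypeError (None + 1) at the first loop step.
def Pre_transformer (input : List Int) : Prop := ¬((1 : Int) ∈ input ∧ (0 : Int) ∉ input)
instance (input : List Int) : Decidable (Pre_transformer input) := by unfold Pre_transformer; infer_instance
def pvWitness_transformer : List Int := [0, 1, 2]

def Spec_transformer (input : List Int) (out : List Int) : Prop := out = transformer_alt input
instance (input : List Int) (out : List Int) : Decidable (Spec_transformer input out) := by unfold Spec_transformer; infer_instance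

-- ===== CLAIM (what is proved, stated in full; the proofs are below) =====
def Claim_equal_transformer : Prop := ∀ (input : List Int), Dom_transformer input → Pre_transformer input → Spec_transformer input (transformer input)

-- ===== LEMMAS AND PROOFS =====

-- [0, 1, ..., n-1] as a List Int
def rng (n : Nat) : List Int := (List.range n).map (fun i => (i : Int))

lemma rng_succ (n : Nat) : rng (n + 1) = rng n ++ [(n : Int)] := by
  simp [rng, List.range_succ]

lemma getLast?_rng (n : Nat) : (rng (n + 1)).getLast? = some (n : Int) := by
  rw [rng_succ]; simp

lemma get?_foldl_insert (f : Int → Int) (src : List Int) (d : PySem.Dict Int Int) (y : Int) :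
    (src.foldl (fun d x => d.insert x (f x)) d).get? y
      = if y ∈ src then some (f y) else d.get? y := by
  induction src generalizing d with
  | nil => simp
  | cons x xs ih =>
    simp only [List.foldl_cons, ih, PySem.Dict.get?_insert, List.mem_cons]
    by_cases hx : y ∈ xs <;> by_cases he : y = x <;> simp [hx, he]

lemma decoderA_rng (input : List Int) (j : Nat) :
    decoderA (encoderA input) (rng (j + 1))
      = if ((j : Int) + 1) ∈ input then
          (if (j : Int) ∈ input then some ((j : Int) + 1) else none)
        else some 999 := by
  have hlast : ∀ (g : Int → Option Int),
      PySem.List.pyGet? ((rng (j + 1)).map g) (-1) = some (g (j : Int)) := by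
    intro g
    rw [PySem.List.pyGet?_neg_one, List.getLast?_map, getLast?_rng]
    rfl
  simp only [decoderA, ffA, hlast, query1A, query2A, encoderA,
    get?_foldl_insert (fun x => x), get?_foldl_insert (fun _ => 1),
    key1A, value1A, key2A, value2A, PySem.Dict.get?_empty]
  by_cases h2 : ((j : Int) + 1) ∈ input <;> by_cases h1 : (j : Int) ∈ input <;>
    simp [h1, h2, Option.map]

lemma scanB_stop (s : List Int) (k : Nat) (h : ¬(k < 999 ∧ (k : Int) ∈ s)) :
    scanB s k = k := by
  rw [scanB]; simp [h]

lemma scanB_step (s : List Int) (k : Nat) (h : k < 999 ∧ (k : Int) ∈ s) :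
    scanB s k = scanB s (k + 1) := by
  rw [scanB]; simp [h]

lemma scanB_congr (s t : List Int) (hm : ∀ x : Int, x ∈ s ↔ x ∈ t) (k : Nat) :
    scanB s k = scanB t k := by
  by_cases hk : 999 ≤ k
  · rw [scanB_stop s k (by omega), scanB_stop t k (by omega)]
  · have hlt : k < 999 := by omega
    by_cases hmem : (k : Int) ∈ s
    · rw [scanB_step s k ⟨hlt, hmem⟩, scanB_step t k ⟨hlt, (hm _).1 hmem⟩]
      exact scanB_congr s t hm (k + 1)
    · rw [scanB_stop s k (by rintro ⟨_, h⟩; exact hmem h),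
        scanB_stop t k (by rintro ⟨_, h⟩; exact hmem ((hm _).2 h))]
termination_by 999 - k

lemma loopA_eq (input : List Int) (hpre : ¬((1 : Int) ∈ input ∧ (0 : Int) ∉ input)) :
    ∀ (fuel j : Nat), 999 - j < fuel → j < 999 → (0 < j → (j : Int) ∈ input) →
      loopA (encoderA input) (rng (j + 1)) fuel = rng (scanB input (j + 1)) ++ [999] := by
  intro fuel
  induction fuel with
  | zero => intro j hf; omega
  | succ fuel ih =>
    intro j hf hj hmem
    rw [loopA, decoderA_rng]
    by_cases h2 : ((j : Int) + 1) ∈ input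
    · have h1 : (j : Int) ∈ input := by
        rcases Nat.eq_zero_or_pos j with h0 | hpos
        · subst h0
          by_contra hc
          exact hpre ⟨by simpa using h2, by simpa using hc⟩
        · exact hmem hpos
      simp only [h2, if_true, h1]
      have hcast : ((j : Int) + 1) = ((j + 1 : Nat) : Int) := by push_cast; ring
      by_cases hbreak : j + 1 = 999
      · have h999 : ((j : Int) + 1) = 999 := by omega
        have hscan : scanB input (j + 1) = j + 1 := by
          apply scanB_stop; omega
        simp [h999, hscan]
      · have hne : ¬((j : Int) + 1 = 999) := by omega
        simp only [hne, if_false]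
        have hout : rng (j + 1) ++ [(j : Int) + 1] = rng (j + 1 + 1) := by
          rw [rng_succ (j + 1)]; rw [hcast]
        rw [hout, ih (j + 1) (by omega) (by omega) (fun _ => by rwa [← hcast]),
          scanB_step input (j + 1) ⟨by omega, by rwa [← hcast]⟩]
    · have hscan : scanB input (j + 1) = j + 1 := by
        apply scanB_stop
        rintro ⟨_, h⟩
        exact h2 (by push_cast at h ⊢; exact h)
      simp [h2, hscan]

lemma transformer_eq_alt (input : List Int) (hpre : Pre_transformer input) :
    transformer input = transformer_alt input := by
  have h0 : ([0] : List Int) = rng 1 := by decide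
  have := loopA_eq input hpre 1000 0 (by omega) (by omega) (by omega)
  rw [transformer, h0, this, transformer_alt]
  have hc : scanB input 1 = scanB (PySem.Set.ofList input) 1 :=
    scanB_congr _ _ (fun x => by simp [PySem.Set.mem_ofList]) 1
  rw [hc]
  rfl

-- ===== VERDICT (by name: the statement is the Claim_ definition above) =====
theorem transformer_spec : Claim_equal_transformer := by
  intro input _ hpre
  exact transformer_eq_alt input hpre
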